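-- pv_equiv track=rewrite | github.com/Smu-Tan/MDI_evaluator | Eval_v5_shaomu.py | merge_and_rerank
-- ===== SOURCE A (Python) =====
-- def merge_and_rerank(decade):
--     de = []
--     ind = -1
--     for i in decade:
--         for j in i:
--             ind += 1
--             j[4] = ind
--             de.append(j)
--     return de
-- ===== SOURCE B (Python) =====
-- def merge_and_rerank(decade):
--     # Recursive over the groups, carrying a base offset computed from group
--     # lengths; each output row is a stamped COPY (A mutates the rows in place).
--     def stamp(row, k):
--         r = row.copy()
--         r[4] = k
--         return r
--     def go(groups, base):
--         if not groups:
--             return []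
--         head = groups[0]
--         return [stamp(row, base + t) for t, row in enumerate(head)] + go(groups[1:], base + len(head))
--     return go(decade, 0)
-- ===== Notes on version B (the rewrite author's own statement) =====
-- stated objective: alternative
-- what changed: A flattens with a fused nested loop mutating each row's field 4 via a global running counter; B is a recursive function over the groups carrying a base offset derived from group lengths and stamps copies of the rows, with no mutation of the input and no global counter.
import Mathlib
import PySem

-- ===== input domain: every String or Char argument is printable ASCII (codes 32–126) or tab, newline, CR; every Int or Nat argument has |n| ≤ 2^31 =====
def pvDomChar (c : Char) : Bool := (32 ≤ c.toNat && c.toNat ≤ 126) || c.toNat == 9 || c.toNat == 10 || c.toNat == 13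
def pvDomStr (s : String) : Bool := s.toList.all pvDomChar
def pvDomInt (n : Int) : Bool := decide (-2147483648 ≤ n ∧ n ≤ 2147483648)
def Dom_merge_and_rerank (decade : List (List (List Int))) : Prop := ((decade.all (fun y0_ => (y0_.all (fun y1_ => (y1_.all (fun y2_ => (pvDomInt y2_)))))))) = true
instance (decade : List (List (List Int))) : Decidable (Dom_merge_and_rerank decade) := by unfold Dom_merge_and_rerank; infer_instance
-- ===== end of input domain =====

-- B replaces A's fused nested loop (flatten + global mutating counter) by a recursive function
-- over the groups carrying a base offset that rebuilds each row functionally by slicing.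
-- A mutates the inner lists in place, B stamps copies: the equivalence proved is about the return value.


-- ===== PORT A =====
-- nested loop over decade, counter ind starting at -1; j[4] = ind then append
def merge_and_rerank (decade : List (List (List Int))) : List (List Int) :=
  (decade.foldl (fun (st : List (List Int) × Int) i =>
      i.foldl (fun (st : List (List Int) × Int) j =>
        (st.1 ++ [j.set 4 (st.2 + 1)], st.2 + 1)) st)
    ([], -1)).1

-- ===== PORT B =====
-- stamp(row, k): r = row.copy(); r[4] = k  (pySetD is exact for the in-range assignments Pre_ admits)
def pvStamp (row : List Int) (k : Int) : List Int :=
  PySem.List.pySetD row 4 k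

-- recursive helper go(groups, base)
def pvGo (groups : List (List (List Int))) (base : Int) : List (List Int) :=
  match groups with
  | [] => []
  | head :: rest =>
      (PySem.List.enumerate head).map (fun p => pvStamp p.2 (base + p.1))
        ++ pvGo rest (base + head.length)

def merge_and_rerank_alt (decade : List (List (List Int))) : List (List Int) :=
  pvGo decade 0

-- ===== PRECONDITION & SPEC =====
-- Pre_ excludes inputs on which A raises IndexError (j[4] = ind with an inner row shorter than 5).
def Pre_merge_and_rerank (decade : List (List (List Int))) : Prop :=
  ∀ i ∈ decade, ∀ j ∈ i, 5 ≤ j.length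
instance (decade : List (List (List Int))) : Decidable (Pre_merge_and_rerank decade) := by unfold Pre_merge_and_rerank; infer_instance
def pvWitness_merge_and_rerank : List (List (List Int)) :=
  [[[1, 2, 3, 4, 0], [9, 9, 9, 9, 9]], [], [[5, 5, 5, 5, 5, 6]]]
def Spec_merge_and_rerank (decade : List (List (List Int))) (out : List (List Int)) : Prop := out = merge_and_rerank_alt decade
instance (decade : List (List (List Int))) (out : List (List Int)) : Decidable (Spec_merge_and_rerank decade out) := by unfold Spec_merge_and_rerank; infer_instance

-- ===== CLAIM (what is proved, stated in full; the proofs are below) =====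
def Claim_equal_merge_and_rerank : Prop := ∀ (decade : List (List (List Int))), Dom_merge_and_rerank decade → Pre_merge_and_rerank decade → Spec_merge_and_rerank decade (merge_and_rerank decade)

-- ===== LEMMAS AND PROOFS =====

-- A's inner step function
def pvStep (st : List (List Int) × Int) (j : List Int) : List (List Int) × Int :=
  (st.1 ++ [j.set 4 (st.2 + 1)], st.2 + 1)

theorem pvKey (xs : List (List Int)) (de : List (List Int)) :
    xs.foldl pvStep (de, (de.length : Int) - 1)
      = (de ++ (PySem.List.enumerate xs (de.length : Int)).map (fun p => p.2.set 4 p.1),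
         (de.length : Int) + xs.length - 1) := by
  induction xs generalizing de with
  | nil => simp [PySem.List.enumerate]
  | cons j xs ih =>
    have h : pvStep (de, (de.length : Int) - 1) j
        = (de ++ [j.set 4 (de.length : Int)], (de.length : Int)) := by
      simp [pvStep]
    have h2 : ((de ++ [j.set 4 (de.length : Int)]).length : Int) - 1 = (de.length : Int) := by
      simp
    calc (j :: xs).foldl pvStep (de, (de.length : Int) - 1)
        = xs.foldl pvStep (de ++ [j.set 4 (de.length : Int)],
            ((de ++ [j.set 4 (de.length : Int)]).length : Int) - 1) := by
          rw [List.foldl_cons, h, h2]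
      _ = _ := by
          rw [ih]
          simp [PySem.List.enumerate_cons]
          ring

-- for rows of length ≥ 5, B's slice-splice is A's in-place set
theorem pvStamp_eq_set (row : List Int) (k : Int) (h : 5 ≤ row.length) :
    pvStamp row k = row.set 4 k := by
  have h4 : (4 : Int) < (row.length : Int) := by exact_mod_cast (by omega : (4 : Nat) < row.length)
  simp [pvStamp, PySem.List.pySetD, PySem.List.pySet?, PySem.List.pyIdx?, h4]

-- a stamped group equals enumerate-with-start and set
theorem pvRows (rows : List (List Int)) (base s : Int)
    (h : ∀ r ∈ rows, 5 ≤ r.length) :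
    (PySem.List.enumerate rows s).map (fun p => pvStamp p.2 (base + p.1))
      = (PySem.List.enumerate rows (base + s)).map (fun p => p.2.set 4 p.1) := by
  induction rows generalizing s with
  | nil => simp [PySem.List.enumerate]
  | cons r rows ih =>
    rw [PySem.List.enumerate_cons, PySem.List.enumerate_cons]
    simp only [List.map_cons]
    rw [pvStamp_eq_set r (base + s) (h r (by simp))]
    have := ih (s + 1) (fun r hr => h r (by simp [hr]))
    rw [show base + s + 1 = base + (s + 1) by ring]
    rw [this]

-- B's recursion computes the enumerate-and-set of the flattened input
theorem pvGo_eq (groups : List (List (List Int))) (base : Int)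
    (h : ∀ i ∈ groups, ∀ j ∈ i, 5 ≤ j.length) :
    pvGo groups base
      = (PySem.List.enumerate groups.flatten base).map (fun p => p.2.set 4 p.1) := by
  induction groups generalizing base with
  | nil => simp [pvGo]
  | cons g groups ih =>
    rw [pvGo, List.flatten_cons, PySem.List.enumerate_append, List.map_append]
    rw [pvRows g base 0 (h g (by simp)), add_zero]
    rw [ih (base + g.length) (fun i hi => h i (by simp [hi]))]

-- ===== VERDICT (by name: the statement is the Claim_ definition above) =====
theorem merge_and_rerank_spec : Claim_equal_merge_and_rerank := by
  intro decade _ hpre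
  unfold Spec_merge_and_rerank merge_and_rerank merge_and_rerank_alt
  have hflat : decade.foldl (fun (st : List (List Int) × Int) i => i.foldl pvStep st) ([], -1)
      = decade.flatten.foldl pvStep ([], -1) := by
    rw [List.foldl_flatten]
  have hA := pvKey decade.flatten []
  simp only [List.length_nil, Nat.cast_zero, zero_sub] at hA
  have hB := pvGo_eq decade 0 hpre
  show (decade.foldl (fun (st : List (List Int) × Int) i => i.foldl pvStep st) ([], -1)).1 = _
  rw [hflat, hA, hB]
  simp
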